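-- pv_equiv track=rewrite | github.com/FabriceCh/FormatMyCode | tcl_formatters/source/align_slashes.py | find_blocks_positions
-- ===== SOURCE A (Python) =====
-- def find_blocks_positions(lines):
--     current_block_start = None
--     blocks_positions = []
--     for i, line in enumerate(lines):
--         if line.endswith('\\\n'):
--             if current_block_start is None:
--                 current_block_start = i
--             else:
--                 continue
--         else:
--             if current_block_start is not None:
--                 blocks_positions.append([current_block_start, i])
--                 current_block_start = None
--             else:
--                 continue
--     return blocks_positions
-- ===== SOURCE B (Python) =====
-- def find_blocks_positions(lines):
--     flags = [line.endswith('\\\n') for line in lines]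
--     n = len(flags)
--     blocks = []
--     i = 0
--     while i < n:
--         if flags[i]:
--             j = i
--             while j < n and flags[j]:
--                 j += 1
--             if j < n:
--                 blocks.append([i, j])
--             i = j + 1
--         else:
--             i += 1
--     return blocks
-- ===== Notes on version B (the rewrite author's own statement) =====
-- stated objective: alternative
-- what changed: Replaces A's accumulator state machine (current_block_start carried through one enumerate loop) by a precompute-then-find-runs scan: a boolean flags list is built first, then an outer index skips non-continuation lines and an inner index walks each maximal run of continuation flags, emitting [start, end] only when the run is terminated before EOF.
import Mathlib
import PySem

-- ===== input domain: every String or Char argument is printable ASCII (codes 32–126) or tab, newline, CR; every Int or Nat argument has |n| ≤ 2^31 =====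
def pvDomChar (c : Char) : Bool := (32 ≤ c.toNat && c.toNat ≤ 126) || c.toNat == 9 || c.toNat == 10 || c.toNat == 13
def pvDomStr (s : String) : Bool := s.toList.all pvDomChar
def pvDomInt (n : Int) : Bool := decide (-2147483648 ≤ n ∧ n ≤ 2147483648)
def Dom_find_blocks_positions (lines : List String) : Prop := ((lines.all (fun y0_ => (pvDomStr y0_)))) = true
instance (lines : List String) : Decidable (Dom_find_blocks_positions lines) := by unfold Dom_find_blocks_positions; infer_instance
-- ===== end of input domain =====

-- B replaces A's accumulator state machine by a precompute-flags-then-scan-runs decomposition (alternative structure, same cost).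

-- ===== PORT A =====
-- 'for i, line in enumerate(lines)' with state (current_block_start, blocks_positions), step for step
def findBlocksGoA (lines : List String) (i : Int) (cur : Option Int)
    (acc : List (List Int)) : List (List Int) :=
  match lines with
  | [] => acc
  | line :: rest =>
    if PySem.Str.endswith line "\\\n" then
      match cur with
      | none => findBlocksGoA rest (i + 1) (some i) acc
      | some _ => findBlocksGoA rest (i + 1) cur acc
    else
      match cur with
      | some s => findBlocksGoA rest (i + 1) none (acc ++ [[s, i]])
      | none => findBlocksGoA rest (i + 1) none acc

def find_blocks_positions (lines : List String) : List (List Int) :=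
  findBlocksGoA lines 0 none []

-- ===== PORT B =====
-- inner 'while j < n and flags[j]: j += 1' : length of the leading run of True flags
def takeTruesLen : List Bool → Nat
  | true :: rest => takeTruesLen rest + 1
  | _ => 0

-- outer 'while i < n' scan over the flags list
def findBlocksGoB (flags : List Bool) (i : Int) : List (List Int) :=
  match flags with
  | [] => []
  | false :: rest => findBlocksGoB rest (i + 1)
  | true :: rest =>
    let k := takeTruesLen rest
    match h : rest.drop k with
    | [] => []
    | _ :: rest' => [i, i + 1 + k] :: findBlocksGoB rest' (i + 1 + k + 1)
termination_by flags.length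
decreasing_by
  all_goals
    try (have hlen := congrArg List.length h; simp at hlen)
    simp
    try omega

def find_blocks_positions_alt (lines : List String) : List (List Int) :=
  findBlocksGoB (lines.map (fun line => PySem.Str.endswith line "\\\n")) 0

-- ===== PRECONDITION & SPEC =====
def Spec_find_blocks_positions (lines : List String) (out : List (List Int)) : Prop := out = find_blocks_positions_alt lines
instance (lines : List String) (out : List (List Int)) : Decidable (Spec_find_blocks_positions lines out) := by unfold Spec_find_blocks_positions; infer_instance

-- ===== CLAIM (what is proved, stated in full; the proofs are below) =====
def Claim_equal_find_blocks_positions : Prop := ∀ (lines : List String), Dom_find_blocks_positions lines → Spec_find_blocks_positions lines (find_blocks_positions lines)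

-- ===== LEMMAS AND PROOFS =====

theorem takeTruesLen_true (r : List Bool) : takeTruesLen (true :: r) = takeTruesLen r + 1 := rfl
theorem takeTruesLen_false (r : List Bool) : takeTruesLen (false :: r) = 0 := rfl

theorem goB_nil (i : Int) : findBlocksGoB [] i = [] := by rw [findBlocksGoB]
theorem goB_cons_false (rest : List Bool) (i : Int) :
    findBlocksGoB (false :: rest) i = findBlocksGoB rest (i + 1) := by rw [findBlocksGoB]

-- proof-side view of B's scan while inside an open block started at s
def emitB (rest : List Bool) (i s : Int) : List (List Int) :=
  if takeTruesLen rest < rest.length then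
    [s, i + takeTruesLen rest] ::
      findBlocksGoB (rest.drop (takeTruesLen rest + 1)) (i + takeTruesLen rest + 1)
  else []

theorem emitB_cons_true (rest : List Bool) (i s : Int) :
    emitB (true :: rest) i s = emitB rest (i + 1) s := by
  unfold emitB
  simp only [takeTruesLen_true, List.length_cons, List.drop_succ_cons, Nat.cast_add,
    Nat.cast_one]
  by_cases hk : takeTruesLen rest < rest.length
  · rw [if_pos (by omega), if_pos hk]
    have h1 : i + ((takeTruesLen rest : Int) + 1) = i + 1 + (takeTruesLen rest : Int) := by ring
    rw [h1]
  · rw [if_neg (by omega), if_neg hk]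

theorem goB_cons_true (rest : List Bool) (i : Int) :
    findBlocksGoB (true :: rest) i = emitB rest (i + 1) i := by
  rw [findBlocksGoB]
  split
  next h =>
    have hk : ¬ takeTruesLen rest < rest.length := by
      have := List.drop_eq_nil_iff.mp h; omega
    simp [emitB, hk]
  next b rest' h =>
    have hk : takeTruesLen rest < rest.length := by
      by_contra hh
      have hnil : rest.drop (takeTruesLen rest) = [] := by
        rw [List.drop_eq_nil_iff]; omega
      rw [hnil] at h; cases h
    have hdrop : rest.drop (takeTruesLen rest + 1) = rest' := by
      have h2 : rest.drop (takeTruesLen rest + 1) = (rest.drop (takeTruesLen rest)).drop 1 := by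
        rw [List.drop_drop, Nat.add_comm]
      rw [h2, h]; rfl
    rw [emitB, if_pos hk, hdrop]

theorem goA_eq_goB (lines : List String) :
    (∀ i acc, findBlocksGoA lines i none acc
        = acc ++ findBlocksGoB (lines.map (fun line => PySem.Str.endswith line "\\\n")) i) ∧
    (∀ i s acc, findBlocksGoA lines i (some s) acc
        = acc ++ emitB (lines.map (fun line => PySem.Str.endswith line "\\\n")) i s) := by
  induction lines with
  | nil => simp [findBlocksGoA, goB_nil, emitB, takeTruesLen]
  | cons line rest ih =>
    constructor
    · intro i acc
      by_cases hl : PySem.Str.endswith line "\\\n"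
      · simp only [findBlocksGoA, hl, if_true, List.map_cons]
        rw [ih.2, goB_cons_true]
      · simp only [findBlocksGoA, hl, Bool.false_eq_true, if_false, List.map_cons]
        rw [ih.1, goB_cons_false]
    · intro i s acc
      by_cases hl : PySem.Str.endswith line "\\\n"
      · simp only [findBlocksGoA, hl, if_true, List.map_cons]
        rw [ih.2, emitB_cons_true]
      · simp only [findBlocksGoA, hl, Bool.false_eq_true, if_false, List.map_cons]
        rw [ih.1]
        simp [emitB, takeTruesLen_false]

-- ===== VERDICT (by name: the statement is the Claim_ definition above) =====
theorem find_blocks_positions_spec : Claim_equal_find_blocks_positions := by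
  intro lines _
  unfold Spec_find_blocks_positions find_blocks_positions find_blocks_positions_alt
  simpa using (goA_eq_goB lines).1 0 []
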